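-- pv_equiv track=rewrite | github.com/venkat102/alfred-processing | alfred/orchestrator.py | _looks_like_analytics_query
-- ===== SOURCE A (Python) =====
-- _FAST_PATH_INSIGHTS_PREFIXES = (
-- 	"what doctypes ",
-- 	"which doctypes ",
-- 	"what workflows ",
-- 	"which workflows ",
-- 	"what notifications ",
-- 	"which notifications ",
-- 	"what custom fields ",
-- 	"which custom fields ",
-- 	"what server scripts ",
-- 	"which server scripts ",
-- 	"what client scripts ",
-- 	"which client scripts ",
-- 	"what customizations ",
-- 	"which customizations ",
-- 	"what modules ",
-- 	"which modules ",
-- 	"list my ",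
-- 	"list all ",
-- 	"show me my ",
-- 	"show me the ",
-- 	"show me all ",
-- 	"do i have ",
-- 	"does my site have ",
-- 	"how many ",
-- )
--
-- _FAST_PATH_INSIGHTS_PATTERNS = (
-- 	# "what * do i have" / "what * does the site have"
-- 	" do i have",
-- 	" does the site have",
-- 	" does my site have",
-- 	" are on my site",
-- 	" are active on",
-- 	" are installed on",
-- )
--
-- _FAST_PATH_INSIGHTS_ANALYTICS_PREFIXES = (
-- 	"show top ",
-- 	"show the top ",
-- 	"show me top ",
-- 	"list the top ",
-- 	"count of ",
-- 	"summarize ",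
-- 	"summarise ",
-- 	"summary of ",
-- 	"report on ",
-- 	"report me ",
-- )
--
-- def _looks_like_analytics_query(prompt: str) -> bool:
-- 	"""Return True if the prompt is a read-side analytics / Q&A phrasing
-- 	that should never be interpreted as a build intent.
--
-- 	Mirrors the mode-level Insights fast-path (``_FAST_PATH_INSIGHTS_*``).
-- 	Dev-side guardrail: even if ``classify_mode`` somehow lands on dev
-- 	(manual override, active plan, classifier miss), a prompt like
-- 	"show top 10 customers by revenue" must not get routed to a Builder
-- 	specialist - the LLM intent classifier would pick a random intent
-- 	from 22 options and hallucinate a changeset out of thin air.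
-- 	"""
-- 	if not prompt:
-- 		return False
-- 	normalized = prompt.strip().lower().rstrip("!.?,")
-- 	if not normalized:
-- 		return False
-- 	for prefix in _FAST_PATH_INSIGHTS_ANALYTICS_PREFIXES:
-- 		if normalized.startswith(prefix):
-- 			return True
-- 	for prefix in _FAST_PATH_INSIGHTS_PREFIXES:
-- 		if normalized.startswith(prefix):
-- 			return True
-- 	for pattern in _FAST_PATH_INSIGHTS_PATTERNS:
-- 		if pattern in normalized:
-- 			return True
-- 	return False
-- ===== SOURCE B (Python) =====
-- _FAST_PATH_INSIGHTS_PREFIXES = (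
--     "what doctypes ", "which doctypes ", "what workflows ", "which workflows ",
--     "what notifications ", "which notifications ", "what custom fields ",
--     "which custom fields ", "what server scripts ", "which server scripts ",
--     "what client scripts ", "which client scripts ", "what customizations ",
--     "which customizations ", "what modules ", "which modules ", "list my ",
--     "list all ", "show me my ", "show me the ", "show me all ", "do i have ",
--     "does my site have ", "how many ",
-- )
--
-- _FAST_PATH_INSIGHTS_PATTERNS = (
--     " do i have", " does the site have", " does my site have",
--     " are on my site", " are active on", " are installed on",
-- )
--
-- _FAST_PATH_INSIGHTS_ANALYTICS_PREFIXES = (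
--     "show top ", "show the top ", "show me top ", "list the top ", "count of ",
--     "summarize ", "summarise ", "summary of ", "report on ", "report me ",
-- )
--
-- # Hash index: prefixes grouped by length, matched with one slice + set lookup
-- # per distinct length instead of a linear startswith scan over every prefix.
-- _PREFIX_INDEX = {}
-- for _p in _FAST_PATH_INSIGHTS_ANALYTICS_PREFIXES + _FAST_PATH_INSIGHTS_PREFIXES:
--     _PREFIX_INDEX.setdefault(len(_p), set()).add(_p)
--
-- # Substring patterns matched by a sliding window: one pass over positions,
-- # each window checked against the set of patterns of that length.
-- _PATTERN_INDEX = {}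
-- for _p in _FAST_PATH_INSIGHTS_PATTERNS:
--     _PATTERN_INDEX.setdefault(len(_p), set()).add(_p)
--
--
-- def _looks_like_analytics_query(prompt: str) -> bool:
--     if not prompt:
--         return False
--     normalized = prompt.strip().lower().rstrip("!.?,")
--     if not normalized:
--         return False
--     if any(normalized[:L] in ps for L, ps in _PREFIX_INDEX.items()):
--         return True
--     return any(normalized[i:i + L] in ps
--                for i in range(len(normalized))
--                for L, ps in _PATTERN_INDEX.items())
-- ===== Notes on version B (the rewrite author's own statement) =====
-- stated objective: alternative
-- what changed: Replaced the three linear scans (startswith per prefix, 'in' per pattern) by two hash indexes keyed by pattern length: prefixes are matched by one slice-and-set-lookup per distinct length, and the substring patterns by a single sliding-window pass whose windows are looked up in a set.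
import Mathlib
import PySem

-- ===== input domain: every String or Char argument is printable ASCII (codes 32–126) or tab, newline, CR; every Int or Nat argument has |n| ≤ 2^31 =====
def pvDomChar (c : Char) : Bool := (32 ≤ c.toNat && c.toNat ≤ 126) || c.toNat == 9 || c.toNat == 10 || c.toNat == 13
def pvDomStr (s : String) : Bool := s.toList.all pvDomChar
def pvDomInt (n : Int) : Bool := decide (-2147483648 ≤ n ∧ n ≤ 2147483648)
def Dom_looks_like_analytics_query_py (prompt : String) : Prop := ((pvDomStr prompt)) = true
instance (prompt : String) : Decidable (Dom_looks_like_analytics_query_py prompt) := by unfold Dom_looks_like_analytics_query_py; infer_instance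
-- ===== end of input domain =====

-- B replaces A's three linear scans (startswith per prefix, 'in' per pattern) by two length-keyed
-- hash indexes: one slice + set lookup per distinct prefix length, and a sliding window looked up
-- in a pattern set — an alternative structure, no speed claim.

-- shared normalization, identical in both Pythons: prompt.strip().lower().rstrip("!.?,")
-- (str.rstrip(chars) ported by hand — drop trailing chars of the set from the right — exact;
-- it is the right half of PySem.Chars.stripChars)
def pvNorm (s : List Char) : List Char :=
  (List.dropWhile (fun c => ("!.?,".toList).contains c)
    (PySem.Chars.lower (PySem.Chars.strip s)).reverse).reverse

-- ===== PORT A =====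
def pvAnalyticsPrefixes : List (List Char) := ["show top ".toList, "show the top ".toList, "show me top ".toList, "list the top ".toList, "count of ".toList, "summarize ".toList, "summarise ".toList, "summary of ".toList, "report on ".toList, "report me ".toList]

def pvInsightsPrefixes : List (List Char) := ["what doctypes ".toList, "which doctypes ".toList, "what workflows ".toList, "which workflows ".toList, "what notifications ".toList, "which notifications ".toList, "what custom fields ".toList, "which custom fields ".toList, "what server scripts ".toList, "which server scripts ".toList, "what client scripts ".toList, "which client scripts ".toList, "what customizations ".toList, "which customizations ".toList, "what modules ".toList, "which modules ".toList, "list my ".toList, "list all ".toList, "show me my ".toList, "show me the ".toList, "show me all ".toList, "do i have ".toList, "does my site have ".toList, "how many ".toList]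

def pvPatterns : List (List Char) := [" do i have".toList, " does the site have".toList, " does my site have".toList, " are on my site".toList, " are active on".toList, " are installed on".toList]

def looks_like_analytics_query_py (prompt : String) : Bool :=
  if prompt.toList.isEmpty then false
  else
    let normalized := pvNorm prompt.toList
    if normalized.isEmpty then false
    else
      -- three sequential scan loops, each returning True on the first hit
      if pvAnalyticsPrefixes.any (fun p => PySem.Chars.startswith normalized p) then true
      else if pvInsightsPrefixes.any (fun p => PySem.Chars.startswith normalized p) then true
      else if pvPatterns.any (fun p => PySem.Chars.isIn p normalized) then true
      else false

-- ===== PORT B =====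
-- _PREFIX_INDEX / _PATTERN_INDEX of Source B: dicts keyed by length, values the sets of
-- prefixes/patterns of that length (PySem.Set = list of distinct elements; only membership is used)
def pvPrefixIndex : List (Nat × List (List Char)) := [(9, ["show top ".toList, "count of ".toList, "list all ".toList, "how many ".toList]), (13, ["show the top ".toList, "list the top ".toList, "what modules ".toList]), (12, ["show me top ".toList, "show me the ".toList, "show me all ".toList]), (10, ["summarize ".toList, "summarise ".toList, "report on ".toList, "report me ".toList, "do i have ".toList]), (11, ["summary of ".toList, "show me my ".toList]), (14, ["what doctypes ".toList, "which modules ".toList]), (15, ["which doctypes ".toList, "what workflows ".toList]), (16, ["which workflows ".toList]), (19, ["what notifications ".toList, "what custom fields ".toList]), (20, ["which notifications ".toList, "which custom fields ".toList, "what server scripts ".toList, "what client scripts ".toList, "what customizations ".toList]), (21, ["which server scripts ".toList, "which client scripts ".toList, "which customizations ".toList]), (8, ["list my ".toList]), (18, ["does my site have ".toList])]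

def pvPatternIndex : List (Nat × List (List Char)) := [(10, [" do i have".toList]), (19, [" does the site have".toList]), (18, [" does my site have".toList]), (15, [" are on my site".toList]), (14, [" are active on".toList]), (17, [" are installed on".toList])]

def looks_like_analytics_query_py_alt (prompt : String) : Bool :=
  if prompt.toList.isEmpty then false
  else
    let normalized := pvNorm prompt.toList
    if normalized.isEmpty then false
    else
      -- normalized[:L] and normalized[i:i+L] are slices with bounds 0 ≤ a ≤ b: exactly take / drop-take
      if pvPrefixIndex.any (fun g => g.2.contains (normalized.take g.1)) then true
      else
        (List.range normalized.length).any (fun i =>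
          pvPatternIndex.any (fun g => g.2.contains ((normalized.drop i).take g.1)))

-- ===== PRECONDITION & SPEC =====
def Spec_looks_like_analytics_query_py (prompt : String) (out : Bool) : Prop := out = looks_like_analytics_query_py_alt prompt
instance (prompt : String) (out : Bool) : Decidable (Spec_looks_like_analytics_query_py prompt out) := by unfold Spec_looks_like_analytics_query_py; infer_instance

-- ===== CLAIM (what is proved, stated in full; the proofs are below) =====
def Claim_equal_looks_like_analytics_query_py : Prop := ∀ (prompt : String), Dom_looks_like_analytics_query_py prompt → Spec_looks_like_analytics_query_py prompt (looks_like_analytics_query_py prompt)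

-- ===== LEMMAS AND PROOFS =====

lemma pvTakeEqIffPrefix (n p : List Char) (L : Nat) (h : p.length = L) :
    (n.take L = p) ↔ (p <+: n) := by
  subst h; rw [List.prefix_iff_eq_take]; exact eq_comm

lemma pvExistsWindowIff (n pat : List Char) (L : Nat) (h : pat.length = L) (hL : 0 < L) :
    (∃ i, i < n.length ∧ (n.drop i).take L = pat) ↔ PySem.Chars.isIn pat n = true := by
  rw [← PySem.Chars.exists_prefix_drop_iff_isIn]
  constructor
  · rintro ⟨i, _, heq⟩
    exact ⟨i, (pvTakeEqIffPrefix (n.drop i) pat L h).mp heq⟩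
  · rintro ⟨j, hpre⟩
    refine ⟨j, ?_, (pvTakeEqIffPrefix (n.drop j) pat L h).mpr hpre⟩
    by_contra hj
    have hdrop : n.drop j = [] := List.drop_eq_nil_of_le (by omega)
    rw [hdrop] at hpre
    have : pat = [] := List.prefix_nil.mp hpre
    rw [this] at h
    simp at h
    omega

lemma pv_win_0 (n : List Char) : (∃ i, i < n.length ∧ (n.drop i).take 10 = " do i have".toList) ↔ PySem.Chars.isIn " do i have".toList n = true := pvExistsWindowIff n _ 10 (by decide) (by decide)

lemma pv_win_1 (n : List Char) : (∃ i, i < n.length ∧ (n.drop i).take 19 = " does the site have".toList) ↔ PySem.Chars.isIn " does the site have".toList n = true := pvExistsWindowIff n _ 19 (by decide) (by decide)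

lemma pv_win_2 (n : List Char) : (∃ i, i < n.length ∧ (n.drop i).take 18 = " does my site have".toList) ↔ PySem.Chars.isIn " does my site have".toList n = true := pvExistsWindowIff n _ 18 (by decide) (by decide)

lemma pv_win_3 (n : List Char) : (∃ i, i < n.length ∧ (n.drop i).take 15 = " are on my site".toList) ↔ PySem.Chars.isIn " are on my site".toList n = true := pvExistsWindowIff n _ 15 (by decide) (by decide)

lemma pv_win_4 (n : List Char) : (∃ i, i < n.length ∧ (n.drop i).take 14 = " are active on".toList) ↔ PySem.Chars.isIn " are active on".toList n = true := pvExistsWindowIff n _ 14 (by decide) (by decide)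

lemma pv_win_5 (n : List Char) : (∃ i, i < n.length ∧ (n.drop i).take 17 = " are installed on".toList) ↔ PySem.Chars.isIn " are installed on".toList n = true := pvExistsWindowIff n _ 17 (by decide) (by decide)

lemma pvIfChain3 (a b c : Bool) :
    (if a then true else if b then true else if c then true else false) = (a || b || c) := by
  cases a <;> cases b <;> cases c <;> rfl

lemma pvIfChain2 (a b : Bool) : (if a then true else b) = (a || b) := by
  cases a <;> rfl

-- every group member has the group's length
lemma pvIndexLen : ∀ g ∈ pvPrefixIndex, ∀ p ∈ g.2, p.length = g.1 := by decide

-- every indexed prefix is one of A's prefixes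
lemma pvIndexMem : ∀ g ∈ pvPrefixIndex, ∀ p ∈ g.2, p ∈ pvAnalyticsPrefixes ++ pvInsightsPrefixes := by decide

-- every prefix of A sits in its length's group
lemma pvIndexCover :
    ∀ p ∈ pvAnalyticsPrefixes ++ pvInsightsPrefixes, ∃ g ∈ pvPrefixIndex, p ∈ g.2 ∧ p.length = g.1 := by decide

lemma pvPrefixPart (n : List Char) :
    (pvPrefixIndex.any (fun g => g.2.contains (n.take g.1)) = true) ↔
    (pvAnalyticsPrefixes.any (fun p => PySem.Chars.startswith n p) = true ∨
     pvInsightsPrefixes.any (fun p => PySem.Chars.startswith n p) = true) := by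
  simp only [List.any_eq_true, List.contains_iff_mem, PySem.Chars.startswith_iff]
  constructor
  · rintro ⟨g, hg, hmem⟩
    have hlen := pvIndexLen g hg _ hmem
    have hpre : n.take g.1 <+: n := (pvTakeEqIffPrefix n _ g.1 hlen).mp rfl
    rcases List.mem_append.mp (pvIndexMem g hg _ hmem) with h | h
    · exact Or.inl ⟨_, h, hpre⟩
    · exact Or.inr ⟨_, h, hpre⟩
  · rintro (⟨p, hp, hpre⟩ | ⟨p, hp, hpre⟩) <;>
      [obtain ⟨g, hg, hpg, hlen⟩ := pvIndexCover p (List.mem_append.mpr (Or.inl hp));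
       obtain ⟨g, hg, hpg, hlen⟩ := pvIndexCover p (List.mem_append.mpr (Or.inr hp))] <;>
      exact ⟨g, hg, (pvTakeEqIffPrefix n p g.1 hlen).mpr hpre ▸ hpg⟩

set_option maxHeartbeats 1000000 in
lemma pvPatternPart (n : List Char) :
    ((List.range n.length).any (fun i =>
        pvPatternIndex.any (fun g => g.2.contains ((n.drop i).take g.1))) = true) ↔
    (pvPatterns.any (fun p => PySem.Chars.isIn p n) = true) := by
  simp only [pvPatternIndex, pvPatterns, List.any_cons, List.any_nil, Bool.or_eq_true,
    List.contains_cons, List.contains_nil, beq_iff_eq, List.any_eq_true, List.mem_range,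
    Bool.false_eq_true, or_false, and_or_left, exists_or]
  rw [pv_win_0, pv_win_1, pv_win_2, pv_win_3, pv_win_4, pv_win_5]

-- ===== VERDICT (by name: the statement is the Claim_ definition above) =====
theorem looks_like_analytics_query_py_spec : Claim_equal_looks_like_analytics_query_py := by
  intro prompt _
  unfold Spec_looks_like_analytics_query_py
  by_cases h1 : prompt.toList.isEmpty
  · simp [looks_like_analytics_query_py, looks_like_analytics_query_py_alt, h1]
  · by_cases h2 : (pvNorm prompt.toList).isEmpty
    · simp [looks_like_analytics_query_py, looks_like_analytics_query_py_alt, h1, h2]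
    · simp only [looks_like_analytics_query_py, looks_like_analytics_query_py_alt, h1, h2,
        Bool.false_eq_true, if_false]
      rw [pvIfChain3, pvIfChain2, Bool.eq_iff_iff]
      simp only [Bool.or_eq_true]
      rw [pvPrefixPart, pvPatternPart]
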